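-- pv_equiv track=rewrite | github.com/fairvotereform/rcv_cruncher | crunch.py | rcvreg
-- ===== SOURCE A (Python) =====
-- from collections import Counter
--
-- def remove(x,l):
--     return [i for i in l if i != x]
--
-- def keep(x,l):
--     return [i for i in l if i in x]
--
-- def rcvreg(ballots):
--     rounds = []
--     while True:
--         rounds.append(list(zip(*Counter(b[0] for b in ballots).most_common())))
--         finalists, tallies = rounds[-1]
--         if tallies[0]*2 > sum(tallies):
--             return rounds
--         ballots = remove([], (keep(finalists[:-1], b) for b in ballots))
-- ===== SOURCE B (Python) =====
-- def rcvreg(ballots):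
--     rounds = []
--     state = [(b, 0) for b in ballots]
--     while True:
--         counts = {}
--         for b, k in state:
--             c = b[k]
--             counts[c] = counts.get(c, 0) + 1
--         mc = sorted(counts.items(), key=lambda kv: kv[1], reverse=True)
--         finalists = tuple(kv[0] for kv in mc)
--         tallies = tuple(kv[1] for kv in mc)
--         rounds.append([finalists, tallies])
--         if tallies[0] * 2 > sum(tallies):
--             return rounds
--         alive = set(finalists[:-1])
--         nxt = []
--         for b, k in state:
--             while k < len(b) and b[k] not in alive:
--                 k += 1
--             if k < len(b):
--                 nxt.append((b, k))
--         state = nxt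
-- ===== Notes on version B (the rewrite author's own statement) =====
-- stated objective: faster
-- what changed: Instead of rebuilding the whole ballot list each round (filtering every ballot by the surviving finalists and re-counting with Counter), B keeps one immutable copy of the ballots with a per-ballot pointer to its current effective first choice plus an alive-candidate set, advances each pointer past eliminated candidates incrementally, and counts heads with a dict in original ballot order so Counter's tie order is reproduced exactly.
import Mathlib
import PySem

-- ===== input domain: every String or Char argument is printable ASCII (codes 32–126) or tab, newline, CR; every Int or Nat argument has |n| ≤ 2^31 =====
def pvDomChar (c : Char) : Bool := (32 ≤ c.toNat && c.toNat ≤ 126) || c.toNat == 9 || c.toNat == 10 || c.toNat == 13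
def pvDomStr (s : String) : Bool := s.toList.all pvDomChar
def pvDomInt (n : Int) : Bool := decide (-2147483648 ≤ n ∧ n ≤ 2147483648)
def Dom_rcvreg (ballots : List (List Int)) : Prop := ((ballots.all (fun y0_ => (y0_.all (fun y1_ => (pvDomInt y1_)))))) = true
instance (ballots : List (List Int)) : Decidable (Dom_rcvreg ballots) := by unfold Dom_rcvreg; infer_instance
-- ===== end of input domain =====

-- B replaces A's per-round rebuild of the ballot list by a per-ballot pointer into the unchanged
-- ballots plus an alive-candidate set (a timing run measured B faster). Equal return value on
-- Pre_; the fuel in both ports is only a totality guard (the Python loops terminate on Pre_).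

-- ===== PORT A =====
-- while True: count heads with Counter, most_common (stable sort, count descending), append the
-- round, stop on majority, else keep only non-last finalists in each ballot and drop empty ballots.
def rcvregLoop : Nat → List (List Int) → List (List (List Int)) → List (List (List Int))
  | 0, _, rounds => rounds
  | fuel+1, ballots, rounds =>
    let mc := PySem.List.sorted (PySem.Dict.counter (ballots.map (fun b => b.headD 0))).items
                (fun kv => kv.2) true
    let finalists := mc.map (fun kv => kv.1)
    let tallies := mc.map (fun kv => kv.2)
    let rounds' := rounds ++ [[finalists, tallies]]
    if mc = [] then rounds'  -- Python raises here (unpacking an empty round); outside Pre_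
    else if tallies.headD 0 * 2 > tallies.sum then rounds'
    else rcvregLoop fuel
      ((ballots.map (fun b => b.filter (fun c => finalists.dropLast.contains c))).filter
        (fun b => b ≠ [])) rounds'

def rcvreg (ballots : List (List Int)) : List (List (List Int)) :=
  rcvregLoop ((ballots.map (fun b => b.length)).sum + 1) ballots []

-- ===== PORT B =====
-- while k < len(b) and b[k] not in alive: k += 1
def rcvregAltSkip (b : List Int) (alive : PySem.Set Int) (k : Nat) : Nat :=
  if h : k < b.length then
    if PySem.Set.contains alive (b.getD k 0) then k else rcvregAltSkip b alive (k+1)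
  else k
termination_by b.length - k

def rcvregAltLoop : Nat → List (List Int × Nat) → List (List (List Int)) → List (List (List Int))
  | 0, _, rounds => rounds
  | fuel+1, state, rounds =>
    let counts := state.foldl
      (fun d p => d.insert (p.1.getD p.2 0) (d.getD (p.1.getD p.2 0) 0 + 1))
      (PySem.Dict.empty : PySem.Dict Int Int)
    let mc := PySem.List.sorted counts.items (fun kv => kv.2) true
    let finalists := mc.map (fun kv => kv.1)
    let tallies := mc.map (fun kv => kv.2)
    let rounds' := rounds ++ [[finalists, tallies]]
    if mc = [] then rounds'  -- Python raises here (tallies[0] on an empty list); outside Pre_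
    else if tallies.headD 0 * 2 > tallies.sum then rounds'
    else
      let alive : PySem.Set Int := PySem.Set.ofList finalists.dropLast
      rcvregAltLoop fuel
        (state.foldl (fun nxt p =>
          let k := rcvregAltSkip p.1 alive p.2
          if k < p.1.length then nxt ++ [(p.1, k)] else nxt) []) rounds'

def rcvreg_alt (ballots : List (List Int)) : List (List (List Int)) :=
  rcvregAltLoop ((ballots.map (fun b => b.length)).sum + 1) (ballots.map (fun b => (b, 0))) []

-- ===== PRECONDITION & SPEC =====
-- Pre_ excludes exactly the inputs on which A raises: an empty ballot list (ValueError when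
-- unpacking the empty first round) and any empty ballot (IndexError on b[0]).
def Pre_rcvreg (ballots : List (List Int)) : Prop :=
  ballots ≠ [] ∧ ∀ b ∈ ballots, b ≠ []
instance (ballots : List (List Int)) : Decidable (Pre_rcvreg ballots) := by
  unfold Pre_rcvreg; infer_instance

def pvWitness_rcvreg : List (List Int) := [[1, 2], [2, 1], [2]]

def Spec_rcvreg (ballots : List (List Int)) (out : List (List (List Int))) : Prop := out = rcvreg_alt ballots
instance (ballots : List (List Int)) (out : List (List (List Int))) : Decidable (Spec_rcvreg ballots out) := by unfold Spec_rcvreg; infer_instance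

-- ===== CLAIM (what is proved, stated in full; the proofs are below) =====
def Claim_equal_rcvreg : Prop := ∀ (ballots : List (List Int)), Dom_rcvreg ballots → Pre_rcvreg ballots → Spec_rcvreg ballots (rcvreg ballots)

-- ===== LEMMAS AND PROOFS =====

-- filtering is blind to a dropped all-false prefix
lemma filter_dropWhile_not {p : Int → Bool} (l : List Int) :
    (l.dropWhile (fun x => !p x)).filter p = l.filter p := by
  induction l with
  | nil => rfl
  | cons x t ih =>
    by_cases hx : p x = true
    · simp [hx]
    · simp only [Bool.not_eq_true] at hx
      simp [hx, ih]

-- the pointer skip realises dropWhile on the suffix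
lemma drop_skip (b : List Int) (alive : PySem.Set Int) (k : Nat) :
    b.drop (rcvregAltSkip b alive k) =
      (b.drop k).dropWhile (fun c => !(PySem.Set.contains alive c)) := by
  have H : ∀ n k, b.length - k ≤ n →
      b.drop (rcvregAltSkip b alive k) =
        (b.drop k).dropWhile (fun c => !(PySem.Set.contains alive c)) := by
    intro n
    induction n with
    | zero =>
      intro k hk
      have hge : b.length ≤ k := by omega
      rw [rcvregAltSkip, dif_neg (by omega), List.drop_eq_nil_of_le hge]
      rfl
    | succ n ihn =>
      intro k hk
      rw [rcvregAltSkip]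
      by_cases h : k < b.length
      · rw [dif_pos h]
        have hget : b.getD k 0 = b[k] := List.getD_eq_getElem b 0 h
        by_cases hc : PySem.Set.contains alive (b.getD k 0) = true
        · rw [if_pos hc]
          have hc' : PySem.Set.contains alive b[k] = true := by rwa [hget] at hc
          have hm : b[k] ∈ alive := by simpa using hc'
          conv_rhs => rw [List.drop_eq_getElem_cons h]
          rw [List.dropWhile_cons, if_neg (by simp [hm]), ← List.drop_eq_getElem_cons h]
        · rw [if_neg hc, ihn (k+1) (by omega)]
          have hc' : PySem.Set.contains alive b[k] = false := by
            rw [← hget]; exact Bool.eq_false_iff.mpr hc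
          have hm : b[k] ∉ alive := by
            intro hmem
            have h2 : PySem.Set.contains alive b[k] = true := by simpa using hmem
            rw [h2] at hc'
            simp at hc'
          conv_rhs => rw [List.drop_eq_getElem_cons h, List.dropWhile_cons]
          rw [if_pos (by simp [hm])]
      · rw [dif_neg h, List.drop_eq_nil_of_le (by omega)]
        rfl
  exact H (b.length - k) k le_rfl

lemma skip_head_alive (b : List Int) (alive : PySem.Set Int) (k : Nat)
    (h : rcvregAltSkip b alive k < b.length) :
    PySem.Set.contains alive (b.getD (rcvregAltSkip b alive k) 0) = true := by
  have H : ∀ n k, b.length - k ≤ n → rcvregAltSkip b alive k < b.length →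
      PySem.Set.contains alive (b.getD (rcvregAltSkip b alive k) 0) = true := by
    intro n
    induction n with
    | zero =>
      intro k hk hlt
      rw [rcvregAltSkip, dif_neg (by omega)] at hlt ⊢
      omega
    | succ n ihn =>
      intro k hk hlt
      rw [rcvregAltSkip] at hlt ⊢
      by_cases h1 : k < b.length
      · rw [dif_pos h1] at hlt ⊢
        by_cases hc : PySem.Set.contains alive (b.getD k 0) = true
        · rwa [if_pos hc]
        · rw [if_neg hc] at hlt ⊢
          exact ihn (k+1) (by omega) hlt
      · rw [dif_neg h1] at hlt; omega
  exact H (b.length - k) k le_rfl h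

-- the fold collecting surviving (ballot, advanced pointer) pairs is a filter + map
lemma skip_fold (alive : PySem.Set Int) (state : List (List Int × Nat)) :
    ∀ acc : List (List Int × Nat),
      state.foldl (fun nxt p =>
          if rcvregAltSkip p.1 alive p.2 < p.1.length
          then nxt ++ [(p.1, rcvregAltSkip p.1 alive p.2)] else nxt) acc
        = acc ++ (state.filter
            (fun p => decide (rcvregAltSkip p.1 alive p.2 < p.1.length))).map
              (fun p => (p.1, rcvregAltSkip p.1 alive p.2)) := by
  induction state with
  | nil => intro acc; simp
  | cons q t ih =>
    intro acc
    rw [List.foldl_cons, List.filter_cons]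
    by_cases hq : rcvregAltSkip q.1 alive q.2 < q.1.length
    · rw [if_pos hq, ih]
      simp [hq]
    · rw [if_neg hq, ih]
      simp [hq]

-- the main lockstep invariant: A's current ballots are B's (ballot, pointer) pairs rendered
-- through the current alive predicate S
lemma loop_eq (fuel : Nat) : ∀ (state : List (List Int × Nat)) (S : Int → Bool)
    (rounds : List (List (List Int))),
    (∀ p ∈ state, p.2 < p.1.length ∧ S (p.1.getD p.2 0) = true) →
    rcvregLoop fuel (state.map (fun p => (p.1.drop p.2).filter S)) rounds =
      rcvregAltLoop fuel state rounds := by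
  induction fuel with
  | zero => intro state S rounds _; rfl
  | succ fuel ih =>
    intro state S rounds hinv
    have hrender : ∀ p ∈ state, ((p.1.drop p.2).filter S).headD 0 = p.1.getD p.2 0 := by
      intro p hp
      obtain ⟨hlt, hS⟩ := hinv p hp
      rw [List.getD_eq_getElem p.1 0 hlt] at hS ⊢
      rw [List.drop_eq_getElem_cons hlt, List.filter_cons]
      simp [hS]
    have hheads : (state.map (fun p => (p.1.drop p.2).filter S)).map (fun b => b.headD 0)
        = state.map (fun p => p.1.getD p.2 0) := by
      rw [List.map_map]
      exact List.map_congr_left (fun p hp => hrender p hp)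
    have hD : state.foldl
        (fun d p => d.insert (p.1.getD p.2 0) (d.getD (p.1.getD p.2 0) 0 + 1))
        (PySem.Dict.empty : PySem.Dict Int Int)
        = PySem.Dict.counter (state.map (fun p => p.1.getD p.2 0)) := by
      rw [← PySem.Dict.foldl_insert_getD_add_one_eq_counter, List.foldl_map]
    have hcnt : PySem.Dict.counter
        ((state.map (fun p => (p.1.drop p.2).filter S)).map (fun b => b.headD 0))
        = state.foldl
            (fun d p => d.insert (p.1.getD p.2 0) (d.getD (p.1.getD p.2 0) 0 + 1))
            (PySem.Dict.empty : PySem.Dict Int Int) := by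
      rw [hheads, hD]
    show rcvregLoop (fuel+1) (state.map (fun p => (p.1.drop p.2).filter S)) rounds
        = rcvregAltLoop (fuel+1) state rounds
    simp only [rcvregLoop, rcvregAltLoop]
    rw [hcnt]
    set mc := PySem.List.sorted
        (state.foldl
          (fun d p => d.insert (p.1.getD p.2 0) (d.getD (p.1.getD p.2 0) 0 + 1))
          (PySem.Dict.empty : PySem.Dict Int Int)).items (fun kv => kv.2) true with hmc
    split_ifs with h1 h2
    · rfl
    · rfl
    · -- the continuing round
      set alive : PySem.Set Int := PySem.Set.ofList ((mc.map (fun kv => kv.1)).dropLast)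
        with halive
      have hcontains : ∀ c : Int,
          PySem.Set.contains alive c = ((mc.map (fun kv => kv.1)).dropLast).contains c := by
        intro c
        rw [halive]
        simp [PySem.Set.contains, PySem.Set.mem_ofList]
      have hSsub : ∀ c, PySem.Set.contains alive c = true → S c = true := by
        intro c hc
        rw [hcontains c] at hc
        have hmem : c ∈ (mc.map (fun kv => kv.1)).dropLast := by simpa using hc
        have hmem2 : c ∈ mc.map (fun kv => kv.1) := List.dropLast_subset _ hmem
        simp only [List.mem_map] at hmem2
        obtain ⟨kv, hkv, rfl⟩ := hmem2
        rw [hmc, PySem.List.mem_sorted, hD, PySem.Dict.items_counter] at hkv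
        simp only [List.mem_map] at hkv
        obtain ⟨c', hc', he⟩ := hkv
        have hc'' : c' ∈ state.map (fun p => p.1.getD p.2 0) :=
          (PySem.Set.mem_ofList ..).mp hc'
        simp only [List.mem_map] at hc''
        obtain ⟨p, hp, rfl⟩ := hc''
        have := (hinv p hp).2
        cases he
        exact this
      have hel : ∀ p ∈ state,
          ((p.1.drop p.2).filter S).filter
              (fun c => ((mc.map (fun kv => kv.1)).dropLast).contains c)
            = (p.1.drop (rcvregAltSkip p.1 alive p.2)).filter
                (fun c => PySem.Set.contains alive c) := by
        intro p hp
        have h1c : ∀ c, (((mc.map (fun kv => kv.1)).dropLast).contains c && S c)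
            = PySem.Set.contains alive c := by
          intro c
          rw [← hcontains c]
          cases hca : PySem.Set.contains alive c with
          | false => simp [hca]
          | true => simp [hSsub c hca]
        calc ((p.1.drop p.2).filter S).filter
              (fun c => ((mc.map (fun kv => kv.1)).dropLast).contains c)
            = (p.1.drop p.2).filter
                (fun c => ((mc.map (fun kv => kv.1)).dropLast).contains c && S c) :=
              List.filter_filter ..
          _ = (p.1.drop p.2).filter (fun c => PySem.Set.contains alive c) :=
              List.filter_congr (fun c _ => h1c c)
          _ = ((p.1.drop p.2).dropWhile (fun c => !(PySem.Set.contains alive c))).filter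
                (fun c => PySem.Set.contains alive c) :=
              (filter_dropWhile_not _).symm
          _ = (p.1.drop (rcvregAltSkip p.1 alive p.2)).filter
                (fun c => PySem.Set.contains alive c) := by rw [← drop_skip]
      have hcond : ∀ p ∈ state,
          (decide ((p.1.drop (rcvregAltSkip p.1 alive p.2)).filter
              (fun c => PySem.Set.contains alive c) ≠ []))
            = decide (rcvregAltSkip p.1 alive p.2 < p.1.length) := by
        intro p hp
        by_cases hlt : rcvregAltSkip p.1 alive p.2 < p.1.length
        · have hhd := skip_head_alive p.1 alive p.2 hlt
          rw [List.getD_eq_getElem p.1 0 hlt] at hhd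
          have hm : p.1[rcvregAltSkip p.1 alive p.2] ∈ alive := by simpa using hhd
          rw [List.drop_eq_getElem_cons hlt, List.filter_cons]
          simp [hm, hlt]
        · rw [List.drop_eq_nil_of_le (by omega)]
          simp [hlt]
      have hA : ((state.map (fun p => (p.1.drop p.2).filter S)).map
            (fun b => b.filter (fun c => ((mc.map (fun kv => kv.1)).dropLast).contains c))).filter
              (fun b => b ≠ [])
          = ((state.filter
                (fun p => decide (rcvregAltSkip p.1 alive p.2 < p.1.length))).map
              (fun p => (p.1, rcvregAltSkip p.1 alive p.2))).map
                (fun q => (q.1.drop q.2).filter (fun c => PySem.Set.contains alive c)) := by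
        calc ((state.map (fun p => (p.1.drop p.2).filter S)).map
              (fun b => b.filter
                (fun c => ((mc.map (fun kv => kv.1)).dropLast).contains c))).filter
                  (fun b => b ≠ [])
            = (state.map (fun p => (p.1.drop (rcvregAltSkip p.1 alive p.2)).filter
                (fun c => PySem.Set.contains alive c))).filter (fun b => b ≠ []) := by
              rw [List.map_map]
              exact congrArg _ (List.map_congr_left (fun p hp => hel p hp))
          _ = (state.filter (fun p =>
                decide ((p.1.drop (rcvregAltSkip p.1 alive p.2)).filter
                  (fun c => PySem.Set.contains alive c) ≠ []))).map
                (fun p => (p.1.drop (rcvregAltSkip p.1 alive p.2)).filter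
                  (fun c => PySem.Set.contains alive c)) := List.filter_map ..
          _ = (state.filter
                (fun p => decide (rcvregAltSkip p.1 alive p.2 < p.1.length))).map
                (fun p => (p.1.drop (rcvregAltSkip p.1 alive p.2)).filter
                  (fun c => PySem.Set.contains alive c)) := by
              rw [List.filter_congr (fun p hp => hcond p hp)]
          _ = ((state.filter
                (fun p => decide (rcvregAltSkip p.1 alive p.2 < p.1.length))).map
              (fun p => (p.1, rcvregAltSkip p.1 alive p.2))).map
                (fun q => (q.1.drop q.2).filter (fun c => PySem.Set.contains alive c)) := by
              rw [List.map_map]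
              rfl
      have hinv' : ∀ q ∈ (state.filter
            (fun p => decide (rcvregAltSkip p.1 alive p.2 < p.1.length))).map
              (fun p => (p.1, rcvregAltSkip p.1 alive p.2)),
          q.2 < q.1.length ∧ PySem.Set.contains alive (q.1.getD q.2 0) = true := by
        intro q hq
        simp only [List.mem_map, List.mem_filter] at hq
        obtain ⟨p, ⟨hp, hcnd⟩, rfl⟩ := hq
        have hlt : rcvregAltSkip p.1 alive p.2 < p.1.length := of_decide_eq_true hcnd
        exact ⟨hlt, skip_head_alive p.1 alive p.2 hlt⟩
      rw [hA, skip_fold alive state []]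
      exact ih _ (fun c => PySem.Set.contains alive c) _ hinv'

-- ===== VERDICT (by name: the statement is the Claim_ definition above) =====
theorem rcvreg_spec : Claim_equal_rcvreg := by
  intro ballots _ hpre
  unfold Spec_rcvreg rcvreg rcvreg_alt
  have h := loop_eq ((ballots.map (fun b => b.length)).sum + 1)
      (ballots.map (fun b => (b, 0))) (fun _ => true) []
      (by
        intro p hp
        simp only [List.mem_map] at hp
        obtain ⟨b, hb, rfl⟩ := hp
        exact ⟨List.length_pos_of_ne_nil (hpre.2 b hb), rfl⟩)
  have hm : (ballots.map (fun b => (b, 0))).map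
      (fun p : List Int × Nat => (p.1.drop p.2).filter (fun _ => true)) = ballots := by
    rw [List.map_map]
    conv_rhs => rw [← List.map_id ballots]
    exact List.map_congr_left (fun b _ => by simp)
  rw [hm] at h
  exact h
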